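-- pv_equiv track=rewrite | github.com/mdjaffardjy/AnalyseDonneesNextflow | Scripts/input.py | function
-- ===== SOURCE A (Python) =====
-- def function(tabPa, tabPo, tabA):
--     for i in range (len(tabPa)):
--         for p in tabPo:
--             if p < tabPa[i][0] or tabPa[i][1]<p:
--                 return False
--         for a in tabA:
--             if a < tabPa[i][0] or tabPa[i][1]<a:
--                 return False
--     return True
-- ===== SOURCE B (Python) =====
-- def function(tabPa, tabPo, tabA):
--     pts = tabPo + tabA
--     if not pts or not tabPa:
--         return True
--     lo = max(r[0] for r in tabPa)
--     hi = min(r[1] for r in tabPa)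
--     return lo <= min(pts) and max(pts) <= hi
-- ===== Notes on version B (the rewrite author's own statement) =====
-- stated objective: faster
-- what changed: Instead of re-scanning every point list for every interval, B computes the tightest interval (max of lower bounds, min of upper bounds) and the extreme points (min/max of tabPo+tabA) in single linear passes and compares four numbers.
-- outside the precondition, e.g. on function([(0, 10), (5,)], [20], []): A returns False, B raises IndexError
import Mathlib
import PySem

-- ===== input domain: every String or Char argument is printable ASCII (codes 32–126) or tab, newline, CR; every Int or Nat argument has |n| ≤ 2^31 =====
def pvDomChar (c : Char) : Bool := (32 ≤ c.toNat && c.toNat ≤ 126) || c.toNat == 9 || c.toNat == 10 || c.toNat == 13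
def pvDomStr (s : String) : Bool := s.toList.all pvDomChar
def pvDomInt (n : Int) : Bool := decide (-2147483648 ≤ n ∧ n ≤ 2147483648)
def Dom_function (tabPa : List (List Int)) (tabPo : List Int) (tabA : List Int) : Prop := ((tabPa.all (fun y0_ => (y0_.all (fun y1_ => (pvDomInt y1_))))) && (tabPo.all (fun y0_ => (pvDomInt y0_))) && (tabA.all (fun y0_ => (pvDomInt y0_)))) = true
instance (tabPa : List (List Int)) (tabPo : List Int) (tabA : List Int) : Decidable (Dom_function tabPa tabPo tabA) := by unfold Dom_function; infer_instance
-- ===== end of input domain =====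

-- B replaces A's per-interval re-scan of both point lists by four linear aggregates
-- (tightest interval bounds and extreme points) compared once; measurably faster (asymptotic).

-- ===== PORT A =====
-- the row-by-row loop of A: for each interval, scan tabPo then tabA, returning False early
def aRows (tabPa : List (List Int)) (tabPo : List Int) (tabA : List Int) : Bool :=
  match tabPa with
  | [] => true
  | r :: rest =>
    if tabPo.any (fun p => decide (p < PySem.List.pyGetD r 0 0) || decide (PySem.List.pyGetD r 1 0 < p)) then false
    else if tabA.any (fun a => decide (a < PySem.List.pyGetD r 0 0) || decide (PySem.List.pyGetD r 1 0 < a)) then false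
    else aRows rest tabPo tabA

def function (tabPa : List (List Int)) (tabPo : List Int) (tabA : List Int) : Bool :=
  aRows tabPa tabPo tabA

-- ===== PORT B =====
def function_alt (tabPa : List (List Int)) (tabPo : List Int) (tabA : List Int) : Bool :=
  let pts := tabPo ++ tabA
  if pts.isEmpty || tabPa.isEmpty then true
  else
    match PySem.List.max? (tabPa.map fun r => PySem.List.pyGetD r 0 0) (fun x => x),
          PySem.List.min? (tabPa.map fun r => PySem.List.pyGetD r 1 0) (fun x => x),
          PySem.List.min? pts (fun x => x),
          PySem.List.max? pts (fun x => x) with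
    | some lo, some hi, some pmin, some pmax => decide (lo ≤ pmin) && decide (pmax ≤ hi)
    | _, _, _, _ => false  -- unreachable: all four lists are nonempty here

-- ===== PRECONDITION & SPEC =====
-- Pre_ excludes inputs containing an interval row with fewer than 2 entries while some point
-- exists: B raises IndexError there, and A raises too unless an earlier row already failed.
def Pre_function (tabPa : List (List Int)) (tabPo : List Int) (tabA : List Int) : Prop :=
  (tabPo = [] ∧ tabA = []) ∨ ∀ r ∈ tabPa, 2 ≤ r.length
instance (tabPa : List (List Int)) (tabPo : List Int) (tabA : List Int) : Decidable (Pre_function tabPa tabPo tabA) := by unfold Pre_function; infer_instance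

def pvWitness_function : List (List Int) × List Int × List Int := ([[0, 10], [2, 8]], [3, 5], [4])

def Spec_function (tabPa : List (List Int)) (tabPo : List Int) (tabA : List Int) (out : Bool) : Prop := out = function_alt tabPa tabPo tabA
instance (tabPa : List (List Int)) (tabPo : List Int) (tabA : List Int) (out : Bool) : Decidable (Spec_function tabPa tabPo tabA out) := by unfold Spec_function; infer_instance

-- ===== CLAIM (what is proved, stated in full; the proofs are below) =====
def Claim_equal_function : Prop := ∀ (tabPa : List (List Int)) (tabPo : List Int) (tabA : List Int), Dom_function tabPa tabPo tabA → Pre_function tabPa tabPo tabA → Spec_function tabPa tabPo tabA (function tabPa tabPo tabA)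

-- ===== LEMMAS AND PROOFS =====

-- the common semantic content: every point lies within every interval
def AllIn (tabPa : List (List Int)) (pts : List Int) : Prop :=
  ∀ r ∈ tabPa, ∀ p ∈ pts, PySem.List.pyGetD r 0 0 ≤ p ∧ p ≤ PySem.List.pyGetD r 1 0

theorem aRows_iff (tabPa : List (List Int)) (tabPo tabA : List Int) :
    aRows tabPa tabPo tabA = true ↔ AllIn tabPa (tabPo ++ tabA) := by
  induction tabPa with
  | nil => simp [aRows, AllIn]
  | cons r rest ih =>
    simp only [aRows]
    split_ifs with h1 h2
    · simp only [false_iff]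
      intro h
      simp only [List.any_eq_true, Bool.or_eq_true, decide_eq_true_eq] at h1
      obtain ⟨p, hp, hc⟩ := h1
      have := h r (by simp) p (by simp [hp])
      omega
    · simp only [false_iff]
      intro h
      simp only [List.any_eq_true, Bool.or_eq_true, decide_eq_true_eq] at h2
      obtain ⟨p, hp, hc⟩ := h2
      have := h r (by simp) p (by simp [hp])
      omega
    · rw [ih]
      simp only [List.any_eq_true, not_exists, not_and, Bool.or_eq_true, decide_eq_true_eq,
        not_or, not_lt] at h1 h2
      constructor
      · intro h r' hr' p hp
        rcases List.mem_cons.mp hr' with rfl | hr'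
        · rcases List.mem_append.mp hp with hp | hp
          · exact ⟨(h1 p hp).1, (h1 p hp).2⟩
          · exact ⟨(h2 p hp).1, (h2 p hp).2⟩
        · exact h r' hr' p hp
      · intro h r' hr' p hp
        exact h r' (List.mem_cons_of_mem _ hr') p hp

theorem alt_iff (tabPa : List (List Int)) (tabPo tabA : List Int) :
    function_alt tabPa tabPo tabA = true ↔ AllIn tabPa (tabPo ++ tabA) := by
  unfold function_alt
  set pts := tabPo ++ tabA with hpts
  by_cases hp : pts = []
  · simp [hp, AllIn]
  · by_cases ha : tabPa = []
    · simp [ha, AllIn]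
    · rw [if_neg (by simp [hp, ha])]
      have hlo : ∃ lo, PySem.List.max? (tabPa.map fun r => PySem.List.pyGetD r 0 0) (fun x => x) = some lo := by
        cases h : PySem.List.max? (tabPa.map fun r => PySem.List.pyGetD r 0 0) (fun x => x) with
        | none => exact absurd ((PySem.List.max?_eq_none_iff _ _).mp h) (by simp [ha])
        | some lo => exact ⟨lo, rfl⟩
      have hhi : ∃ hi, PySem.List.min? (tabPa.map fun r => PySem.List.pyGetD r 1 0) (fun x => x) = some hi := by
        cases h : PySem.List.min? (tabPa.map fun r => PySem.List.pyGetD r 1 0) (fun x => x) with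
        | none => exact absurd ((PySem.List.min?_eq_none_iff _ _).mp h) (by simp [ha])
        | some hi => exact ⟨hi, rfl⟩
      have hmn : ∃ m, PySem.List.min? pts (fun x => x) = some m := by
        cases h : PySem.List.min? pts (fun x => x) with
        | none => exact absurd ((PySem.List.min?_eq_none_iff _ _).mp h) hp
        | some m => exact ⟨m, rfl⟩
      have hmx : ∃ m, PySem.List.max? pts (fun x => x) = some m := by
        cases h : PySem.List.max? pts (fun x => x) with
        | none => exact absurd ((PySem.List.max?_eq_none_iff _ _).mp h) hp
        | some m => exact ⟨m, rfl⟩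
      obtain ⟨lo, hlo⟩ := hlo; obtain ⟨hi, hhi⟩ := hhi
      obtain ⟨pmin, hmn⟩ := hmn; obtain ⟨pmax, hmx⟩ := hmx
      rw [hlo, hhi, hmn, hmx]
      simp only [Bool.and_eq_true, decide_eq_true_eq]
      have hloMem := PySem.List.max?_mem hlo
      have hhiMem := PySem.List.min?_mem hhi
      have hmnMem := PySem.List.min?_mem hmn
      have hmxMem := PySem.List.max?_mem hmx
      have hloMax := PySem.List.max?_isMax hlo
      have hhiMin := PySem.List.min?_isMin hhi
      have hmnMin := PySem.List.min?_isMin hmn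
      have hmxMax := PySem.List.max?_isMax hmx
      constructor
      · rintro ⟨h1, h2⟩ r hr p hpmem
        have hle : PySem.List.pyGetD r 0 0 ≤ lo := hloMax _ (List.mem_map.mpr ⟨r, hr, rfl⟩)
        have hge : hi ≤ PySem.List.pyGetD r 1 0 := hhiMin _ (List.mem_map.mpr ⟨r, hr, rfl⟩)
        have h3 : pmin ≤ p := hmnMin p hpmem
        have h4 : p ≤ pmax := hmxMax p hpmem
        omega
      · intro h
        obtain ⟨rlo, hrlo, hrloEq⟩ := List.mem_map.mp hloMem
        obtain ⟨rhi, hrhi, hrhiEq⟩ := List.mem_map.mp hhiMem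
        have h1 := h rlo hrlo pmin hmnMem
        have h2 := h rhi hrhi pmax hmxMem
        omega

-- ===== VERDICT (by name: the statement is the Claim_ definition above) =====
theorem function_spec : Claim_equal_function := by
  intro tabPa tabPo tabA _ _
  unfold Spec_function function
  rw [Bool.eq_iff_iff, aRows_iff, alt_iff]
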